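-- pv_equiv track=rewrite | github.com/loociano/advent-of-code | aoc2019/src/day07/solution.py | decode_opcode
-- ===== SOURCE A (Python) =====
-- def decode_opcode(num):
--   digits = [0, 0, 0, 0, 0]
--   pos = len(digits) - 1
--   while num > 0 and pos >= 0:
--     digits[pos] = num % 10
--     num //= 10
--     pos -= 1
--   return digits
-- ===== SOURCE B (Python) =====
-- def decode_opcode(num):
--   m = max(num, 0)
--   return [m // 10000 % 10, m // 1000 % 10, m // 100 % 10, m // 10 % 10, m % 10]
-- ===== Notes on version B (the rewrite author's own statement) =====
-- stated objective: simpler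
-- what changed: Replaces the mutable-list right-to-left while loop (position index, repeated %10 and //=10) with a clamp to max(num,0) and a direct closed-form list of the five place values m//10**k % 10.
import Mathlib
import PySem

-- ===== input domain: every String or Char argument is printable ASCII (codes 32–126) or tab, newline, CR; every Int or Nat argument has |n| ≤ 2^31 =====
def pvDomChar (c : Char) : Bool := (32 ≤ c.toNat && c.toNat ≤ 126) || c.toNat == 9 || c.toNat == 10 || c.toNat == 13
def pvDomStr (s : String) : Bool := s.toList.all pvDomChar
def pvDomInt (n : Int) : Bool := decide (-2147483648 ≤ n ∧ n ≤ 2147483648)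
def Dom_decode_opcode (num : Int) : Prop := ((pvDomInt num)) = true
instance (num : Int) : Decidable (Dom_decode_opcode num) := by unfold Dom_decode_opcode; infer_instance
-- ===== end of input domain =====

-- B replaces A's mutable-list right-to-left while loop with a clamp max(num,0) and a closed-form list of the five place values; same return value on every int.


-- ===== PORT A =====
-- while num > 0 and pos >= 0: digits[pos] = num % 10; num //= 10; pos -= 1

def decodeLoopA (num : Int) (pos : Int) (digits : List Int) : List Int :=
  if num > 0 ∧ pos ≥ 0 then
    decodeLoopA (PySem.Int.floordiv num 10) (pos - 1)
      (PySem.List.pySetD digits pos (PySem.Int.mod num 10))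
  else digits
termination_by (pos + 1).toNat
decreasing_by omega

def decode_opcode (num : Int) : List Int :=
  decodeLoopA num (PySem.List.len [(0:Int), 0, 0, 0, 0] - 1) [0, 0, 0, 0, 0]

-- ===== PORT B =====
def decode_opcode_alt (num : Int) : List Int :=
  let m := max num 0
  [PySem.Int.mod (PySem.Int.floordiv m 10000) 10,
   PySem.Int.mod (PySem.Int.floordiv m 1000) 10,
   PySem.Int.mod (PySem.Int.floordiv m 100) 10,
   PySem.Int.mod (PySem.Int.floordiv m 10) 10,
   PySem.Int.mod m 10]


-- ===== PRECONDITION & SPEC =====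
def Spec_decode_opcode (num : Int) (out : List Int) : Prop := out = decode_opcode_alt num
instance (num : Int) (out : List Int) : Decidable (Spec_decode_opcode num out) := by unfold Spec_decode_opcode; infer_instance

-- ===== CLAIM (what is proved, stated in full; the proofs are below) =====
def Claim_equal_decode_opcode : Prop := ∀ (num : Int), Dom_decode_opcode num → Spec_decode_opcode num (decode_opcode num)

-- ===== LEMMAS AND PROOFS =====
theorem loop_pos (num pos : Int) (digits : List Int) (h : 0 < num) (hp : 0 ≤ pos) :
    decodeLoopA num pos digits
      = decodeLoopA (num / 10) (pos - 1) (PySem.List.pySetD digits pos (num % 10)) := by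
  rw [decodeLoopA, if_pos ⟨h, hp⟩,
    PySem.Int.floordiv_eq_ediv_of_pos (by norm_num),
    PySem.Int.mod_eq_emod_of_pos (by norm_num)]

theorem loop_stop (num pos : Int) (digits : List Int) (h : ¬(num > 0 ∧ pos ≥ 0)) :
    decodeLoopA num pos digits = digits := by
  rw [decodeLoopA, if_neg h]

theorem decode_opcode_eq (num : Int) : decode_opcode num = decode_opcode_alt num := by
  have hstart : decode_opcode num = decodeLoopA num 4 [0, 0, 0, 0, 0] := by
    rw [decode_opcode]; norm_num [PySem.List.len_eq]
  rw [hstart]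
  simp only [decode_opcode_alt]
  by_cases h0 : num ≤ 0
  · rw [loop_stop _ _ _ (by omega)]
    have hmx : max num 0 = 0 := by omega
    rw [hmx]; decide
  · have h0 : 0 < num := by omega
    have hmx : max num 0 = num := by omega
    rw [hmx]
    by_cases h1 : num < 10
    · rw [loop_pos _ _ _ h0 (by norm_num), loop_stop _ _ _ (by omega)]
      simp [PySem.List.pySetD, PySem.List.pySet?, PySem.List.pyIdx?, Int.toNat, List.set,
        PySem.Int.floordiv_eq_ediv_of_pos, PySem.Int.mod_eq_emod_of_pos]
      omega
    · by_cases h2 : num < 100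
      · rw [loop_pos _ _ _ h0 (by norm_num), loop_pos _ _ _ (by omega) (by norm_num),
          loop_stop _ _ _ (by omega)]
        simp [PySem.List.pySetD, PySem.List.pySet?, PySem.List.pyIdx?, Int.toNat, List.set,
          PySem.Int.floordiv_eq_ediv_of_pos, PySem.Int.mod_eq_emod_of_pos]
        omega
      · by_cases h3 : num < 1000
        · rw [loop_pos _ _ _ h0 (by norm_num), loop_pos _ _ _ (by omega) (by norm_num),
            loop_pos _ _ _ (by omega) (by norm_num), loop_stop _ _ _ (by omega)]
          simp [PySem.List.pySetD, PySem.List.pySet?, PySem.List.pyIdx?, Int.toNat, List.set,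
            PySem.Int.floordiv_eq_ediv_of_pos, PySem.Int.mod_eq_emod_of_pos]
          omega
        · by_cases h4 : num < 10000
          · rw [loop_pos _ _ _ h0 (by norm_num), loop_pos _ _ _ (by omega) (by norm_num),
              loop_pos _ _ _ (by omega) (by norm_num), loop_pos _ _ _ (by omega) (by norm_num),
              loop_stop _ _ _ (by omega)]
            simp [PySem.List.pySetD, PySem.List.pySet?, PySem.List.pyIdx?, Int.toNat, List.set,
              PySem.Int.floordiv_eq_ediv_of_pos, PySem.Int.mod_eq_emod_of_pos]
            omega
          · rw [loop_pos _ _ _ h0 (by norm_num), loop_pos _ _ _ (by omega) (by norm_num),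
              loop_pos _ _ _ (by omega) (by norm_num), loop_pos _ _ _ (by omega) (by norm_num),
              loop_pos _ _ _ (by omega) (by norm_num), loop_stop _ _ _ (by omega)]
            simp [PySem.List.pySetD, PySem.List.pySet?, PySem.List.pyIdx?, Int.toNat, List.set,
              PySem.Int.floordiv_eq_ediv_of_pos, PySem.Int.mod_eq_emod_of_pos]
            omega

-- ===== VERDICT (by name: the statement is the Claim_ definition above) =====
theorem decode_opcode_spec : Claim_equal_decode_opcode := by
  intro num _
  exact decode_opcode_eq num
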